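-- pv_equiv track=rewrite | github.com/Shinyhash/python-tasks | 3 - One-Dimensional Arrays/3.15.py | count_even_and_replace_negatives
-- ===== SOURCE A (Python) =====
-- def count_even_and_replace_negatives(R):
--     count_even = 0
--
--     for i in range(len(R)):
--         if R[i] % 2 == 0:
--             count_even += 1
--
--         if R[i] < 0:
--             R[i] = 111
--
--     return count_even, R
-- ===== SOURCE B (Python) =====
-- def count_even_and_replace_negatives(R):
--     # complement counting: evens = length minus the sum of parities (x % 2 is 0 or 1 in Python)
--     count_even = len(R) - sum(x % 2 for x in R)
--     # wholesale in-place rewrite via slice assignment (mutates R like A does)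
--     R[:] = (111 if x < 0 else x for x in R)
--     return count_even, R
-- ===== Notes on version B (the rewrite author's own statement) =====
-- stated objective: alternative
-- what changed: Replaces A's fused index loop with a conditional counter and per-element mutation by complement counting (count_even = len(R) minus the arithmetic sum of parities, no branch) plus a wholesale slice assignment from a generator for the replacement.
import Mathlib
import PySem

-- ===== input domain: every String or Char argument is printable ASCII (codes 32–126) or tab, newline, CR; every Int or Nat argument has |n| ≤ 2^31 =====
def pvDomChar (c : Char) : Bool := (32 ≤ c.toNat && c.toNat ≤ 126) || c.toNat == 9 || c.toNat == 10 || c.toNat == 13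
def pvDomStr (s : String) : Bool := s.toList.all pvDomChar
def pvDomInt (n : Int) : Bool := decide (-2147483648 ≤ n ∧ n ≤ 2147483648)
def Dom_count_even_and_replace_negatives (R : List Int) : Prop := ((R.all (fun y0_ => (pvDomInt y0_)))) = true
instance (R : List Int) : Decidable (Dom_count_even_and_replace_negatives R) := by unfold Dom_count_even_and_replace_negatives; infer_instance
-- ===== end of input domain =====

-- B counts evens by complement (length minus the sum of parities) and replaces negatives by a
-- wholesale slice assignment; return value only is proved equal (both Pythons mutate R alike).

-- ===== PORT A =====
-- A's single index loop: one pass carrying (count_even, list-so-far); evenness is tested on the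
-- original element before the negative check replaces it.
def count_even_and_replace_negatives (R : List Int) : Int × List Int :=
  R.foldl (fun (st : Int × List Int) x =>
      (if PySem.Int.mod x 2 = 0 then st.1 + 1 else st.1,
       st.2 ++ [if x < 0 then 111 else x]))
    (0, [])

-- ===== PORT B =====
-- B: count_even = len(R) - sum(x % 2 for x in R); then R[:] = (111 if x < 0 else x for x in R).
def count_even_and_replace_negatives_alt (R : List Int) : Int × List Int :=
  ((R.length : Int) - R.foldl (fun s x => s + PySem.Int.mod x 2) 0,
   R.map (fun x => if x < 0 then 111 else x))

-- ===== PRECONDITION & SPEC =====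
def Spec_count_even_and_replace_negatives (R : List Int) (out : Int × List Int) : Prop := out = count_even_and_replace_negatives_alt R
instance (R : List Int) (out : Int × List Int) : Decidable (Spec_count_even_and_replace_negatives R out) := by unfold Spec_count_even_and_replace_negatives; infer_instance

-- ===== CLAIM (what is proved, stated in full; the proofs are below) =====
def Claim_equal_count_even_and_replace_negatives : Prop := ∀ (R : List Int), Dom_count_even_and_replace_negatives R → Spec_count_even_and_replace_negatives R (count_even_and_replace_negatives R)

-- ===== LEMMAS AND PROOFS =====

-- Python's x % 2 is 0 or 1 for every int.
theorem pv_mod_two (x : Int) : PySem.Int.mod x 2 = 0 ∨ PySem.Int.mod x 2 = 1 := by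
  have h := PySem.Int.mod_eq_emod_of_pos (a := x) (b := 2) (by omega)
  rw [h]; omega

-- shifting the start of a summing fold
theorem pv_sum_shift (g : Int → Int) (xs : List Int) : ∀ t : Int,
    xs.foldl (fun s x => s + g x) t = t + xs.foldl (fun s x => s + g x) 0 := by
  induction xs with
  | nil => simp
  | cons y ys ihy =>
    intro t
    simp only [List.foldl]
    rw [ihy, ihy (0 + g y)]; ring

-- A's fused fold from any starting state = (start + length - sum of parities, acc ++ replaced).
theorem pv_fused_fold (R : List Int) : ∀ (c : Int) (acc : List Int),
    R.foldl (fun (st : Int × List Int) x =>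
        (if PySem.Int.mod x 2 = 0 then st.1 + 1 else st.1,
         st.2 ++ [if x < 0 then 111 else x]))
      (c, acc)
    = (c + (R.length : Int) - R.foldl (fun s x => s + PySem.Int.mod x 2) 0,
       acc ++ R.map (fun x => if x < 0 then 111 else x)) := by
  induction R with
  | nil => simp [List.foldl]
  | cons x xs ih =>
    intro c acc
    simp only [List.foldl, List.map, List.length_cons]
    rw [ih]
    refine Prod.ext ?_ (by simp)
    simp only
    rw [pv_sum_shift (fun x => PySem.Int.mod x 2) xs (0 + PySem.Int.mod x 2)]
    rcases pv_mod_two x with h | h <;> rw [h] <;> split_ifs with hx <;>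
      simp_all <;> ring

-- ===== VERDICT (by name: the statement is the Claim_ definition above) =====
theorem count_even_and_replace_negatives_spec : Claim_equal_count_even_and_replace_negatives := by
  intro R _
  unfold Spec_count_even_and_replace_negatives count_even_and_replace_negatives
    count_even_and_replace_negatives_alt
  rw [pv_fused_fold R 0 []]
  simp
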